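-- pv_equiv track=rewrite | github.com/kuaileqiewuyou/Agent_live2d | app/mcp/client.py | _resolve_smoke_tool_name
-- ===== SOURCE A (Python) =====
-- from typing import Any
--
-- def _resolve_smoke_tool_name(tool_name: str | None, tools: list[dict[str, Any]]) -> str | None:
--     normalized_name = str(tool_name or "").strip()
--     if normalized_name:
--         for tool in tools:
--             candidate = str(tool.get("name") or "").strip()
--             if candidate == normalized_name:
--                 return candidate
--         return None
--
--     # Prefer low-risk "read-only" style tool names for default smoke calls.
--     preferred_names = (
--         "ping",
--         "health",
--         "version",
--         "info",
--         "list",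
--         "read",
--         "read_graph",
--         "search",
--         "echo",
--         "status",
--     )
--     normalized_candidates: list[str] = []
--     for tool in tools:
--         candidate = str(tool.get("name") or "").strip()
--         if candidate:
--             normalized_candidates.append(candidate)
--
--     for preferred in preferred_names:
--         for candidate in normalized_candidates:
--             lower_candidate = candidate.lower()
--             if (
--                 lower_candidate == preferred
--                 or lower_candidate.endswith(f"_{preferred}")
--                 or lower_candidate.startswith(f"{preferred}_")
--             ):
--                 return candidate
--
--     for candidate in normalized_candidates:
--         return candidate
--     return None
-- ===== SOURCE B (Python) =====
-- _PREFERRED = (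
--     "ping", "health", "version", "info", "list",
--     "read", "read_graph", "search", "echo", "status",
-- )
--
--
-- def _cand(tool):
--     return str(tool.get("name") or "").strip()
--
--
-- def _rank(candidate):
--     lc = candidate.lower()
--     for i, p in enumerate(_PREFERRED):
--         if lc == p or lc.endswith("_" + p) or lc.startswith(p + "_"):
--             return i
--     return len(_PREFERRED)
--
--
-- def _resolve_smoke_tool_name(tool_name, tools):
--     normalized_name = str(tool_name or "").strip()
--     if normalized_name:
--         return next((c for c in map(_cand, tools) if c == normalized_name), None)
--     # single argmin pass: earliest candidate with the smallest preference rank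
--     best = None  # (rank, candidate)
--     for tool in tools:
--         candidate = _cand(tool)
--         if candidate:
--             r = _rank(candidate)
--             if best is None or r < best[0]:
--                 best = (r, candidate)
--     return best[1] if best is not None else None
-- ===== Notes on version B (the rewrite author's own statement) =====
-- stated objective: simpler
-- what changed: The preferred-outer/candidate-inner nested loops plus the separate first-candidate fallback are replaced by one stable argmin pass over the candidates keyed by preference rank (default rank = len(preferred) makes the fallback fall out), and the exact-name branch becomes a next() over a generator.
import Mathlib
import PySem

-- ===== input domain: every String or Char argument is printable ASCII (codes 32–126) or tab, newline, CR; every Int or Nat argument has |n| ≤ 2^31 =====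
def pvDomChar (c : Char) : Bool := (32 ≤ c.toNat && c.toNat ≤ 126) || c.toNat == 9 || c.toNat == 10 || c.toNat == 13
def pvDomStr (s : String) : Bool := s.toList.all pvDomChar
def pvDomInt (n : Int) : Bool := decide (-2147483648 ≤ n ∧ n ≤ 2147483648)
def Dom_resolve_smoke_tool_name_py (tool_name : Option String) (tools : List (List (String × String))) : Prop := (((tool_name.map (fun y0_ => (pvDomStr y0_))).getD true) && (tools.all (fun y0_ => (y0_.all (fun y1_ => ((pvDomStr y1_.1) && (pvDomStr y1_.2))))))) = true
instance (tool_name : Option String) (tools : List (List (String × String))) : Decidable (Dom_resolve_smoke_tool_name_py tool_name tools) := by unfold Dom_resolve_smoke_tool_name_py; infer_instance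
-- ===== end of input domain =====

-- B replaces A's preferred-outer/candidate-inner nested loops and separate fallback by one
-- stable argmin pass over candidates keyed by preference rank (objective: simpler).


-- ===== PORT A =====
def pvPreferredA : List String :=
  ["ping", "health", "version", "info", "list", "read", "read_graph", "search", "echo", "status"]

-- first loop: linear scan for an exact match on the stripped name
def pvLoopFindA (normalized_name : String) : List (List (String × String)) → Option String
  | [] => none
  | tool :: rest =>
    let candidate := PySem.Str.strip ((PySem.Dict.ofList tool).getD "name" "")
    if candidate = normalized_name then some candidate else pvLoopFindA normalized_name rest

-- inner loop over normalized_candidates for one preferred name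
def pvInnerA (preferred : String) : List String → Option String
  | [] => none
  | candidate :: rest =>
    let lower_candidate := PySem.Str.lower candidate
    if lower_candidate == preferred
        || PySem.Str.endswith lower_candidate ("_" ++ preferred)
        || PySem.Str.startswith lower_candidate (preferred ++ "_")
    then some candidate else pvInnerA preferred rest

-- outer loop over preferred_names
def pvOuterA (cands : List String) : List String → Option String
  | [] => none
  | preferred :: rest =>
    match pvInnerA preferred cands with
    | some c => some c
    | none => pvOuterA cands rest

def resolve_smoke_tool_name_py (tool_name : Option String) (tools : List (List (String × String))) : Option String :=
  let normalized_name := PySem.Str.strip (tool_name.getD "")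
  if normalized_name ≠ "" then
    pvLoopFindA normalized_name tools
  else
    let normalized_candidates := tools.foldl (fun acc tool =>
      let candidate := PySem.Str.strip ((PySem.Dict.ofList tool).getD "name" "")
      if candidate ≠ "" then acc ++ [candidate] else acc) []
    match pvOuterA normalized_candidates pvPreferredA with
    | some c => some c
    | none =>
      -- 'for candidate in normalized_candidates: return candidate; return None'
      match normalized_candidates with
      | [] => none
      | candidate :: _ => some candidate

-- ===== PORT B =====
def pvPreferredB : List String :=
  ["ping", "health", "version", "info", "list", "read", "read_graph", "search", "echo", "status"]

def pvCandB (tool : List (String × String)) : String :=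
  PySem.Str.strip ((PySem.Dict.ofList tool).getD "name" "")

-- the loop body of _rank: index of the first matching preferred name, length if none
def pvRankAux (lc : String) : List String → Nat
  | [] => 0
  | p :: ps =>
    if lc == p || PySem.Str.endswith lc ("_" ++ p) || PySem.Str.startswith lc (p ++ "_")
    then 0 else 1 + pvRankAux lc ps

def pvRankB (candidate : String) : Nat := pvRankAux (PySem.Str.lower candidate) pvPreferredB

-- one step of the argmin pass: keep the earlier best unless strictly smaller rank appears
def pvStepB (best : Option (Nat × String)) (tool : List (String × String)) : Option (Nat × String) :=
  let candidate := pvCandB tool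
  if candidate ≠ "" then
    let r := pvRankB candidate
    match best with
    | none => some (r, candidate)
    | some (br, bc) => if r < br then some (r, candidate) else some (br, bc)
  else best

def resolve_smoke_tool_name_py_alt (tool_name : Option String) (tools : List (List (String × String))) : Option String :=
  let normalized_name := PySem.Str.strip (tool_name.getD "")
  if normalized_name ≠ "" then
    (tools.map pvCandB).find? (fun c => c == normalized_name)
  else
    (tools.foldl pvStepB none).map (·.2)

-- ===== PRECONDITION & SPEC =====
def Spec_resolve_smoke_tool_name_py (tool_name : Option String) (tools : List (List (String × String))) (out : Option String) : Prop := out = resolve_smoke_tool_name_py_alt tool_name tools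
instance (tool_name : Option String) (tools : List (List (String × String))) (out : Option String) : Decidable (Spec_resolve_smoke_tool_name_py tool_name tools out) := by unfold Spec_resolve_smoke_tool_name_py; infer_instance

-- ===== CLAIM (what is proved, stated in full; the proofs are below) =====
def Claim_equal_resolve_smoke_tool_name_py : Prop := ∀ (tool_name : Option String) (tools : List (List (String × String))), Dom_resolve_smoke_tool_name_py tool_name tools → Spec_resolve_smoke_tool_name_py tool_name tools (resolve_smoke_tool_name_py tool_name tools)

-- ===== LEMMAS AND PROOFS =====

-- left-biased minimum-by-rank combiner (the accumulator semantics of pvStepB)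
def pvCmb : Option (Nat × String) → Option (Nat × String) → Option (Nat × String)
  | none, y => y
  | some x, none => some x
  | some (r, c), some (r', c') => if r' < r then some (r', c') else some (r, c)

-- argmin of a candidate list w.r.t. ranks relative to a preferred-name suffix ps
def pvBestL (ps : List String) : List String → Option (Nat × String)
  | [] => none
  | c :: cs => pvCmb (some (pvRankAux (PySem.Str.lower c) ps, c)) (pvBestL ps cs)

theorem pvCmb_assoc (a b c : Option (Nat × String)) :
    pvCmb (pvCmb a b) c = pvCmb a (pvCmb b c) := by
  rcases a with _ | ⟨ra, ca⟩ <;> rcases b with _ | ⟨rb, cb⟩ <;> rcases c with _ | ⟨rc, cc⟩ <;>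
    simp only [pvCmb] <;> split_ifs <;> first | rfl | omega | (simp only [pvCmb]; split_ifs <;> first | rfl | omega)

theorem pvCmb_zero (c : String) (y : Option (Nat × String)) :
    pvCmb (some (0, c)) y = some (0, c) := by
  rcases y with _ | ⟨r', c'⟩ <;> simp [pvCmb]

theorem pvCmb_shift (r : Nat) (c : String) (y : Option (Nat × String)) :
    pvCmb (some (r + 1, c)) (y.map (fun x => (x.1 + 1, x.2))) =
      (pvCmb (some (r, c)) y).map (fun x => (x.1 + 1, x.2)) := by
  rcases y with _ | ⟨r', c'⟩
  · rfl
  · simp only [Option.map_some, pvCmb]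
    split_ifs <;> first | rfl | omega

-- branch 1: A's scan = B's find? over the mapped candidates
theorem pvFind_eq (nn : String) (ts : List (List (String × String))) :
    pvLoopFindA nn ts = (ts.map pvCandB).find? (fun c => c == nn) := by
  induction ts with
  | nil => rfl
  | cons t ts ih =>
    rw [List.map_cons, List.find?_cons]
    show (if pvCandB t = nn then some (pvCandB t) else pvLoopFindA nn ts) = _
    by_cases h : pvCandB t = nn
    · rw [if_pos h]
      have : (pvCandB t == nn) = true := by simp [h]
      rw [this]
    · rw [if_neg h, ih]
      have : (pvCandB t == nn) = false := by simp [h]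
      rw [this]

-- A's accumulation loop builds exactly the filtered mapped list
theorem pvCands_eq (ts : List (List (String × String))) (acc : List String) :
    ts.foldl (fun acc tool =>
      let candidate := PySem.Str.strip ((PySem.Dict.ofList tool).getD "name" "")
      if candidate ≠ "" then acc ++ [candidate] else acc) acc
      = acc ++ (ts.map pvCandB).filter (fun c => c ≠ "") := by
  induction ts generalizing acc with
  | nil => simp
  | cons t ts ih =>
    rw [List.foldl_cons, List.map_cons, List.filter_cons]
    show List.foldl _
        (if PySem.Str.strip ((PySem.Dict.ofList t).getD "name" "") ≠ "" then
          acc ++ [PySem.Str.strip ((PySem.Dict.ofList t).getD "name" "")] else acc) ts = _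
    by_cases h : PySem.Str.strip ((PySem.Dict.ofList t).getD "name" "") = ""
    · rw [if_neg (by simp [h]), ih]
      simp [pvCandB, h]
    · rw [if_pos h, ih]
      simp [pvCandB, h]

-- B's fold = pvCmb of the accumulator with the argmin of the filtered candidates
theorem pvFold_eq (ts : List (List (String × String))) (b : Option (Nat × String)) :
    ts.foldl pvStepB b = pvCmb b (pvBestL pvPreferredB ((ts.map pvCandB).filter (fun c => c ≠ ""))) := by
  induction ts generalizing b with
  | nil => rcases b with _ | ⟨r, c⟩ <;> rfl
  | cons t ts ih =>
    rw [List.foldl_cons, List.map_cons, List.filter_cons]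
    by_cases h : pvCandB t = ""
    · have hstep : pvStepB b t = b := by simp [pvStepB, h]
      rw [hstep, ih, if_neg (by simp [h])]
    · have hstep : pvStepB b t = pvCmb b (some (pvRankB (pvCandB t), pvCandB t)) := by
        rcases b with _ | ⟨br, bc⟩ <;> simp [pvStepB, pvCmb, h]
      rw [hstep, ih, if_pos (by simp [h]), pvBestL]
      exact pvCmb_assoc _ _ _

-- no candidate matches preferred p ⇒ prepending p shifts every rank by one
theorem pvInner_none (p : String) (ps : List String) (cs : List String)
    (h : pvInnerA p cs = none) :
    pvBestL (p :: ps) cs = (pvBestL ps cs).map (fun x => (x.1 + 1, x.2)) := by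
  induction cs with
  | nil => rfl
  | cons c cs ih =>
    simp only [pvInnerA] at h
    by_cases hm : (PySem.Str.lower c == p
        || PySem.Str.endswith (PySem.Str.lower c) ("_" ++ p)
        || PySem.Str.startswith (PySem.Str.lower c) (p ++ "_")) = true
    · simp only [hm, if_pos] at h
      exact absurd h (by simp)
    · rw [Bool.not_eq_true] at hm
      simp only [hm, Bool.false_eq_true, if_neg, not_false_eq_true] at h
      simp only [pvBestL, pvRankAux, hm, Bool.false_eq_true, if_neg, not_false_eq_true, ih h]
      rw [Nat.add_comm 1 (pvRankAux (PySem.Str.lower c) ps)]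
      exact pvCmb_shift _ _ _
-- some candidate matches p (first one c) ⇒ the argmin is (0, c)
theorem pvInner_some (p : String) (ps : List String) (cs : List String) (c : String)
    (h : pvInnerA p cs = some c) :
    pvBestL (p :: ps) cs = some (0, c) := by
  induction cs with
  | nil => simp [pvInnerA] at h
  | cons c0 cs ih =>
    simp only [pvInnerA] at h
    by_cases hm : (PySem.Str.lower c0 == p
        || PySem.Str.endswith (PySem.Str.lower c0) ("_" ++ p)
        || PySem.Str.startswith (PySem.Str.lower c0) (p ++ "_")) = true
    · simp only [hm, if_pos, Option.some.injEq] at h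
      subst h
      simp only [pvBestL, pvRankAux, hm, if_pos]
      exact pvCmb_zero _ _
    · rw [Bool.not_eq_true] at hm
      simp only [hm, Bool.false_eq_true, if_neg, not_false_eq_true] at h
      simp only [pvBestL, pvRankAux, hm, Bool.false_eq_true, if_neg, not_false_eq_true, ih h]
      simp [pvCmb]

-- A's outer loop + first-candidate fallback = the argmin's candidate
theorem pvOuter_eq (ps : List String) (cs : List String) :
    (match pvOuterA cs ps with
      | some c => some c
      | none => match cs with | [] => none | c :: _ => some c)
      = (pvBestL ps cs).map (·.2) := by
  induction ps generalizing cs with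
  | nil =>
    cases cs with
    | nil => rfl
    | cons c cs => simp [pvOuterA, pvBestL, pvRankAux, pvCmb_zero]
  | cons p ps ih =>
    cases hin : pvInnerA p cs with
    | some c =>
      have hA : pvOuterA cs (p :: ps) = some c := by simp only [pvOuterA, hin]
      rw [hA, pvInner_some p ps cs c hin]
      rfl
    | none =>
      have hA : pvOuterA cs (p :: ps) = pvOuterA cs ps := by simp only [pvOuterA, hin]
      rw [hA, pvInner_none p ps cs hin, ih cs]
      cases pvBestL ps cs <;> rfl

-- ===== VERDICT (by name: the statement is the Claim_ definition above) =====
theorem resolve_smoke_tool_name_py_spec : Claim_equal_resolve_smoke_tool_name_py := by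
  intro tool_name tools _
  unfold Spec_resolve_smoke_tool_name_py resolve_smoke_tool_name_py resolve_smoke_tool_name_py_alt
  by_cases h : PySem.Str.strip (tool_name.getD "") = ""
  · simp only [h, ne_eq, not_true_eq_false, if_false, pvCands_eq _ [], List.nil_append,
      pvFold_eq, pvCmb]
    exact (pvOuter_eq pvPreferredA _).trans rfl
  · simp only [h, ne_eq, not_false_eq_true, if_true]
    exact pvFind_eq _ _
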